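-- pv_equiv track=rewrite | github.com/posl/comment_recommendation | script/mod_gen/1_time/zh/113_D/0.py | amidakuji
-- ===== SOURCE A (Python) =====
-- def amidakuji(h,w,k):
--     if h==1:
--         if k==1:
--             return 1
--         else:
--             return 2
--     else:
--         if k==1:
--             return 1
--         elif k==w:
--             return 1
--         else:
--             return amidakuji(h-1,w-1,k-1)+amidakuji(h-1,w-1,k)
-- ===== SOURCE B (Python) =====
-- def amidakuji(h, w, k):
--     # Top-down path-counting sweep: instead of A's exponential tree recursion,
--     # carry one row of multiplicities (how many recursion paths reach each
--     # position) down the levels, adding finished paths into a running total;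
--     # the sweep stops as soon as no path is alive.
--     total = 0
--     lo = k            # position of row[0] at the current level
--     row = [1]         # row[i] = number of live paths at position lo + i
--     hh, ww = h, w
--     while row:
--         if hh == 1:
--             for i, c in enumerate(row):
--                 total += c if lo + i == 1 else 2 * c
--             break
--         alive = [0 if (lo + i == 1 or lo + i == ww) else c
--                  for i, c in enumerate(row)]
--         total += sum(c for i, c in enumerate(row)
--                      if lo + i == 1 or lo + i == ww)
--         row = [a + b for a, b in zip([0] + alive, alive + [0])]
--         lo -= 1
--         while row and row[0] == 0:
--             row = row[1:]
--             lo += 1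
--         while row and row[-1] == 0:
--             row = row[:-1]
--         hh -= 1
--         ww -= 1
--     return total
-- ===== Notes on version B (the rewrite author's own statement) =====
-- stated objective: faster
-- what changed: Replaced A's exponential two-branch tree recursion by a single top-down level sweep that carries one row of path multiplicities (trimmed of dead positions) and accumulates finished paths into a running total; intended as faster (a timing run saw A time out at n=16 where B answered in 0.26 ms, and 6.63x at the largest size both finished, below the 5 ms floor needed to confirm a ratio).
-- outside the precondition, e.g. on amidakuji(0, 2, 1): A returns 1, B returns 1; on amidakuji(0, 1, 2): A raises RecursionError, B does not finish within the time limit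
import Mathlib
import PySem

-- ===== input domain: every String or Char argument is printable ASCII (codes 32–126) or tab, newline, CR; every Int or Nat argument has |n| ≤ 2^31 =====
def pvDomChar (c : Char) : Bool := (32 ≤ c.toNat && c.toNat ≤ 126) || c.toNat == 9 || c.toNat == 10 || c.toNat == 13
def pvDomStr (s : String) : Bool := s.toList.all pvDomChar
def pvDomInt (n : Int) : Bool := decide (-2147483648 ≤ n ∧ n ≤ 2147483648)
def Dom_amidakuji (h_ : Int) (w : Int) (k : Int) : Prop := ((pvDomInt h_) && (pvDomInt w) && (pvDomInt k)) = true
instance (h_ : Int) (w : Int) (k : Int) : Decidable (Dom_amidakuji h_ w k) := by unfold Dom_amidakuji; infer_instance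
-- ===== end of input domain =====

-- B replaces A's exponential two-branch tree recursion by a single top-down sweep
-- that carries one row of path multiplicities per level; equivalence is claimed for h ≥ 1.

-- ===== PORT A =====
-- A's recursion made total with a fuel counter; for h ≥ 1 (Pre_) fuel (h-1).toNat
-- is never exhausted (each recursive call decreases h by 1 and ends at h = 1),
-- so the 0-fuel branch is unreachable on the claimed domain.
def amidakujiF (fuel : Nat) (h : Int) (w : Int) (k : Int) : Int :=
  if h = 1 then
    if k = 1 then 1 else 2
  else
    if k = 1 then 1
    else if k = w then 1
    else
      match fuel with
      | 0 => 0
      | f + 1 => amidakujiF f (h - 1) (w - 1) (k - 1) + amidakujiF f (h - 1) (w - 1) k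
termination_by fuel

def amidakuji (h_ : Int) (w : Int) (k : Int) : Int :=
  amidakujiF (h_ - 1).toNat h_ w k

-- ===== PORT B =====
-- 'for i, c in enumerate(row): total += c if lo + i == 1 else 2 * c'
def altFlush (lo : Int) (row : List Int) (total : Int) : Int :=
  (PySem.List.enumerate row 0).foldl
    (fun t ic => if lo + ic.1 = 1 then t + ic.2 else t + 2 * ic.2) total

-- 'alive = [0 if (lo + i == 1 or lo + i == ww) else c for i, c in enumerate(row)]'
def altAlive (lo : Int) (ww : Int) (row : List Int) : List Int :=
  (PySem.List.enumerate row 0).map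
    (fun ic => if lo + ic.1 = 1 ∨ lo + ic.1 = ww then 0 else ic.2)

-- 'sum(c for i, c in enumerate(row) if lo + i == 1 or lo + i == ww)'
def altBoundary (lo : Int) (ww : Int) (row : List Int) : Int :=
  ((PySem.List.enumerate row 0).filter
      (fun ic => decide (lo + ic.1 = 1 ∨ lo + ic.1 = ww))).foldl
    (fun s ic => s + ic.2) 0

-- 'while row and row[0] == 0: row = row[1:]; lo += 1'
def altTrimFront : Int → List Int → Int × List Int
  | lo, [] => (lo, [])
  | lo, c :: t => if c = 0 then altTrimFront (lo + 1) t else (lo, c :: t)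

-- 'while row and row[-1] == 0: row = row[:-1]'  (drop trailing zeros)
def altTrimBack (row : List Int) : List Int :=
  (row.reverse.dropWhile (· == 0)).reverse

-- the 'while row:' loop; fuel (h-1).toNat is never exhausted for h ≥ 1 (Pre_)
-- since every non-break iteration decreases hh by 1 and the hh = 1 break fires
def altLoop : Nat → Int → Int → Int → Int → List Int → Int
  | _, total, _, _, _, [] => total
  | 0, total, lo, hh, _, c :: t =>
      if hh = 1 then altFlush lo (c :: t) total else total
  | f + 1, total, lo, hh, ww, c :: t =>
      if hh = 1 then altFlush lo (c :: t) total
      else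
        let row := c :: t
        let total' := total + altBoundary lo ww row
        let alive := altAlive lo ww row
        let nxt := List.zipWith (· + ·) (0 :: alive) (alive ++ [0])
        let p := altTrimFront (lo - 1) nxt
        altLoop f total' p.1 (hh - 1) (ww - 1) (altTrimBack p.2)

def amidakuji_alt (h_ : Int) (w : Int) (k : Int) : Int :=
  altLoop (h_ - 1).toNat 0 k h_ w [1]

-- ===== PRECONDITION & SPEC =====
-- Pre_ restricts to the puzzle's natural domain of heights h ≥ 1: on h ≤ 0 A's
-- recursion never reaches its h == 1 base case and raises RecursionError whenever
-- some descent path escapes the k/w boundaries (e.g. (0, 1, 2)); where every path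
-- happens to bottom out at a boundary A does return, and B returns the same value
-- there, but that corner is not claimed.
def Pre_amidakuji (h_ : Int) (w : Int) (k : Int) : Prop := 1 ≤ h_
instance (h_ : Int) (w : Int) (k : Int) : Decidable (Pre_amidakuji h_ w k) := by
  unfold Pre_amidakuji; infer_instance
def pvWitness_amidakuji : Int × Int × Int := (4, 5, 3)

def Spec_amidakuji (h_ : Int) (w : Int) (k : Int) (out : Int) : Prop := out = amidakuji_alt h_ w k
instance (h_ : Int) (w : Int) (k : Int) (out : Int) : Decidable (Spec_amidakuji h_ w k out) := by
  unfold Spec_amidakuji; infer_instance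

-- ===== CLAIM (what is proved, stated in full; the proofs are below) =====
def Claim_equal_amidakuji : Prop := ∀ (h_ : Int) (w : Int) (k : Int), Dom_amidakuji h_ w k → Pre_amidakuji h_ w k → Spec_amidakuji h_ w k (amidakuji h_ w k)

-- ===== LEMMAS AND PROOFS =====

-- A at height 1
theorem amid_one (w k : Int) : amidakuji 1 w k = if k = 1 then 1 else 2 := by
  unfold amidakuji amidakujiF
  simp

-- A-value is 1 on the k-boundaries for h ≥ 2
theorem amid_boundary (h w k : Int) (hh : 2 ≤ h) (hb : k = 1 ∨ k = w) :
    amidakuji h w k = 1 := by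
  unfold amidakuji
  rw [amidakujiF.eq_def]
  have h1 : ¬ h = 1 := by omega
  rw [if_neg h1]
  split_ifs with h2 h3
  · rfl
  · rfl
  · rcases hb with hb | hb <;> contradiction

-- A's recurrence, fuel-free, for h ≥ 2 off the boundaries
theorem amid_rec (h w k : Int) (hh : 2 ≤ h) (hk1 : k ≠ 1) (hkw : k ≠ w) :
    amidakuji h w k =
      amidakuji (h - 1) (w - 1) (k - 1) + amidakuji (h - 1) (w - 1) k := by
  unfold amidakuji
  have hfu : (h - 1).toNat = (h - 2).toNat + 1 := by omega
  have hf2 : (h - 1 - 1).toNat = (h - 2).toNat := by omega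
  rw [hfu, hf2]
  rw [amidakujiF]
  have hne : h ≠ 1 := by omega
  simp [hne, hk1, hkw]

-- weighted sum of A-values over a row of multiplicities (proof-side helper)
def wsum (hh : Int) (ww : Int) : Int → List Int → Int
  | _, [] => 0
  | lo, c :: t => c * amidakuji hh ww lo + wsum hh ww (lo + 1) t

-- boundary mass of a row (proof-side counterpart of altBoundary)
def bsum (ww : Int) : Int → List Int → Int
  | _, [] => 0
  | lo, c :: t => (if lo = 1 ∨ lo = ww then c else 0) + bsum ww (lo + 1) t

-- masked row (proof-side counterpart of altAlive)
def maskL (ww : Int) : Int → List Int → List Int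
  | _, [] => []
  | lo, c :: t => (if lo = 1 ∨ lo = ww then 0 else c) :: maskL ww (lo + 1) t

theorem flush_eq (ww : Int) : ∀ (row : List Int) (s lo total : Int),
    (PySem.List.enumerate row s).foldl
        (fun t ic => if lo + ic.1 = 1 then t + ic.2 else t + 2 * ic.2) total
      = total + wsum 1 ww (lo + s) row := by
  intro row
  induction row with
  | nil => intro s lo total; simp [PySem.List.enumerate_nil, wsum]
  | cons c t ih =>
      intro s lo total
      rw [PySem.List.enumerate_cons, List.foldl_cons, ih]
      simp only [wsum, amid_one]
      have : lo + (s + 1) = lo + s + 1 := by ring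
      rw [this]
      by_cases hb : lo + s = 1
      · simp [hb]; ring
      · simp [hb]; ring

theorem boundary_eq (ww : Int) : ∀ (row : List Int) (s lo acc : Int),
    ((PySem.List.enumerate row s).filter
        (fun ic => decide (lo + ic.1 = 1 ∨ lo + ic.1 = ww))).foldl
      (fun a ic => a + ic.2) acc
      = acc + bsum ww (lo + s) row := by
  intro row
  induction row with
  | nil => intro s lo acc; simp [PySem.List.enumerate_nil, bsum]
  | cons c t ih =>
      intro s lo acc
      rw [PySem.List.enumerate_cons]
      have hstep : lo + (s + 1) = lo + s + 1 := by ring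
      by_cases hb : lo + s = 1 ∨ lo + s = ww
      · rw [List.filter_cons_of_pos (by simpa using hb), List.foldl_cons, ih, hstep]
        simp only [bsum, if_pos hb]
        ring
      · rw [List.filter_cons_of_neg (by simpa using hb), ih, hstep]
        simp only [bsum, if_neg hb]
        ring

theorem alive_eq (ww : Int) : ∀ (row : List Int) (s lo : Int),
    (PySem.List.enumerate row s).map
        (fun ic => if lo + ic.1 = 1 ∨ lo + ic.1 = ww then 0 else ic.2)
      = maskL ww (lo + s) row := by
  intro row
  induction row with
  | nil => intro s lo; simp [PySem.List.enumerate_nil, maskL]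
  | cons c t ih =>
      intro s lo
      rw [PySem.List.enumerate_cons, List.map_cons, ih]
      have hstep : lo + (s + 1) = lo + s + 1 := by ring
      rw [hstep]
      rfl

theorem wsum_zipWith (hh ww : Int) : ∀ (xs ys : List Int) (lo : Int),
    xs.length = ys.length →
    wsum hh ww lo (List.zipWith (· + ·) xs ys) = wsum hh ww lo xs + wsum hh ww lo ys := by
  intro xs
  induction xs with
  | nil => intro ys lo hl; cases ys <;> simp_all [wsum]
  | cons x xt ih =>
      intro ys lo hl
      cases ys with
      | nil => simp at hl
      | cons y yt =>
          simp only [List.zipWith_cons_cons, wsum]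
          rw [ih yt (lo + 1) (by simpa using hl)]
          ring

theorem wsum_append (hh ww : Int) : ∀ (xs ys : List Int) (lo : Int),
    wsum hh ww lo (xs ++ ys) = wsum hh ww lo xs + wsum hh ww (lo + xs.length) ys := by
  intro xs
  induction xs with
  | nil => intro ys lo; simp [wsum]
  | cons x xt ih =>
      intro ys lo
      simp only [List.cons_append, wsum, ih, List.length_cons]
      push_cast
      ring_nf

theorem wsum_zeros (hh ww : Int) : ∀ (ys : List Int) (lo : Int),
    (∀ c ∈ ys, c = 0) → wsum hh ww lo ys = 0 := by
  intro ys
  induction ys with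
  | nil => intro lo _; rfl
  | cons c t ih =>
      intro lo hz
      have hc : c = 0 := hz c (List.mem_cons_self ..)
      simp [wsum, hc, ih (lo + 1) (fun x hx => hz x (List.mem_cons_of_mem _ hx))]

theorem trimFront_eq (hh ww : Int) : ∀ (xs : List Int) (lo : Int),
    wsum hh ww (altTrimFront lo xs).1 (altTrimFront lo xs).2 = wsum hh ww lo xs := by
  intro xs
  induction xs with
  | nil => intro lo; rfl
  | cons c t ih =>
      intro lo
      by_cases hc : c = 0
      · simp only [altTrimFront, if_pos hc]
        rw [ih (lo + 1)]
        simp [wsum, hc]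
      · simp [altTrimFront, if_neg hc]

theorem trimBack_eq (hh ww : Int) (xs : List Int) (lo : Int) :
    wsum hh ww lo (altTrimBack xs) = wsum hh ww lo xs := by
  have hx : xs = altTrimBack xs ++ (xs.reverse.takeWhile (· == 0)).reverse := by
    unfold altTrimBack
    conv_lhs => rw [← List.reverse_reverse xs,
      ← List.takeWhile_append_dropWhile (p := (· == 0)) (l := xs.reverse)]
    rw [List.reverse_append]
  conv_rhs => rw [hx]
  rw [wsum_append]
  have hz : wsum hh ww (lo + ((altTrimBack xs).length : Int))
      ((xs.reverse.takeWhile (· == 0)).reverse) = 0 := by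
    apply wsum_zeros
    intro c hc
    rw [List.mem_reverse] at hc
    have := List.mem_takeWhile_imp hc
    simpa using this
  rw [hz]
  ring

-- the key per-row identity: Pascal step + boundary absorption
theorem wsum_step (hh ww : Int) (h2 : 2 ≤ hh) : ∀ (row : List Int) (lo : Int),
    wsum hh ww lo row
      = bsum ww lo row
        + (wsum (hh - 1) (ww - 1) (lo - 1) (maskL ww lo row)
           + wsum (hh - 1) (ww - 1) lo (maskL ww lo row)) := by
  intro row
  induction row with
  | nil => intro lo; simp [wsum, bsum, maskL]
  | cons c t ih =>
      intro lo
      have hun : wsum hh ww lo (c :: t) = c * amidakuji hh ww lo + wsum hh ww (lo + 1) t := rfl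
      have hw : ∀ (lo' m : Int) (r : List Int),
          wsum (hh - 1) (ww - 1) lo' (m :: r)
            = m * amidakuji (hh - 1) (ww - 1) lo' + wsum (hh - 1) (ww - 1) (lo' + 1) r :=
        fun _ _ _ => rfl
      by_cases hb : lo = 1 ∨ lo = ww
      · have hmask : maskL ww lo (c :: t) = 0 :: maskL ww (lo + 1) t := by
          simp [maskL, hb]
        have hbs : bsum ww lo (c :: t) = c + bsum ww (lo + 1) t := by
          simp [bsum, hb]
        rw [hun, hmask, hbs, hw, hw, ih (lo + 1), amid_boundary hh ww lo h2 hb,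
            show lo - 1 + 1 = lo by ring]
        ring
      · have hmask : maskL ww lo (c :: t) = c :: maskL ww (lo + 1) t := by
          simp [maskL, hb]
        have hbs : bsum ww lo (c :: t) = 0 + bsum ww (lo + 1) t := by
          simp [bsum, hb]
        rw [not_or] at hb
        rw [hun, hmask, hbs, hw, hw, ih (lo + 1), amid_rec hh ww lo h2 hb.1 hb.2,
            show lo - 1 + 1 = lo by ring]
        ring

-- loop invariant: altLoop adds the weighted sum of A-values of the current row
theorem altLoop_eq : ∀ (fuel : Nat) (total lo hh ww : Int) (row : List Int),
    1 ≤ hh → hh - 1 ≤ (fuel : Int) →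
    altLoop fuel total lo hh ww row = total + wsum hh ww lo row := by
  intro fuel
  induction fuel with
  | zero =>
      intro total lo hh ww row h1 hf
      have hh1 : hh = 1 := by omega
      cases row with
      | nil => simp [altLoop, wsum]
      | cons c t =>
          simp only [altLoop, hh1]
          have := flush_eq ww (c :: t) 0 lo total
          rw [add_zero] at this
          exact this
  | succ f ih =>
      intro total lo hh ww row h1 hf
      cases row with
      | nil => simp [altLoop, wsum]
      | cons c t =>
          by_cases hh1 : hh = 1
          · simp only [altLoop, hh1]
            have := flush_eq ww (c :: t) 0 lo total
            rw [add_zero] at this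
            exact this
          · have h2 : 2 ≤ hh := by omega
            simp only [altLoop, if_neg hh1]
            rw [ih _ _ _ _ _ (by omega) (by omega)]
            rw [trimBack_eq, trimFront_eq]
            have halive : altAlive lo ww (c :: t) = maskL ww lo (c :: t) := by
              have := alive_eq ww (c :: t) 0 lo
              rw [add_zero] at this
              simpa [altAlive] using this
            have hlen : (0 :: altAlive lo ww (c :: t)).length
                = (altAlive lo ww (c :: t) ++ [0]).length := by
              simp
            rw [wsum_zipWith _ _ _ _ _ hlen, wsum_append]
            have hbd : total + altBoundary lo ww (c :: t) = total + bsum ww lo (c :: t) := by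
              have := boundary_eq ww (c :: t) 0 lo 0
              rw [add_zero] at this
              simp only [altBoundary, this, zero_add]
            rw [hbd, halive]
            simp only [wsum, zero_mul, zero_add]
            have hstep := wsum_step hh ww h2 (c :: t) lo
            rw [show wsum hh ww lo (c :: t)
                  = c * amidakuji hh ww lo + wsum hh ww (lo + 1) t from rfl] at hstep
            rw [show lo - 1 + 1 = lo by ring]
            linarith [hstep]

-- ===== VERDICT (by name: the statement is the Claim_ definition above) =====
theorem amidakuji_spec : Claim_equal_amidakuji := by
  intro h w k _ hpre
  have hpre1 : 1 ≤ h := hpre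
  unfold Spec_amidakuji amidakuji_alt
  rw [altLoop_eq (h - 1).toNat 0 k h w [1] hpre1 (by omega)]
  simp [wsum]
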